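-- pv_equiv track=rewrite | github.com/Ananaya-J/rt-structural-analysis | domain_predictor/scripts/01c_fetch_interpro_bulk.py | build_residue_labels
-- ===== SOURCE A (Python) =====
-- TARGET_PFAM = {
--     "PF00078": "RVT_1",
--     "PF06817": "RVT_thumb",
--     "PF06815": "RVT_connect",
--     "PF00075": "RNase_H",
--     "PF08388": "GIIM",
-- }
--
-- def build_residue_labels(sequence, domains):
--     labels = ["none"] * len(sequence)
--     for pfam_id, start, end in domains:
--         name = TARGET_PFAM.get(pfam_id, None)
--         if name is None:
--             continue
--         for pos in range(max(0, start - 1), min(end, len(sequence))):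
--             if labels[pos] == "none":
--                 labels[pos] = name
--     return labels
-- ===== SOURCE B (Python) =====
-- TARGET_PFAM = {
--     "PF00078": "RVT_1",
--     "PF06817": "RVT_thumb",
--     "PF06815": "RVT_connect",
--     "PF00075": "RNase_H",
--     "PF08388": "GIIM",
-- }
--
-- def build_residue_labels(sequence, domains):
--     # Per-position first-match scan instead of per-domain painting:
--     # a residue's label is the name of the FIRST known domain covering it.
--     doms = [(TARGET_PFAM[p], s, e) for (p, s, e) in domains if p in TARGET_PFAM]
--
--     def lab(i):
--         for name, s, e in doms:
--             if s - 1 <= i < e: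
--                 return name
--         return "none"
--
--     return [lab(i) for i in range(len(sequence))]
-- ===== Notes on version B (the rewrite author's own statement) =====
-- stated objective: alternative
-- what changed: A paints a mutable label array domain-by-domain, skipping already-painted cells; B computes each position's label independently as the name of the first known domain covering it (per-position first-match scan, no mutation).
import Mathlib
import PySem

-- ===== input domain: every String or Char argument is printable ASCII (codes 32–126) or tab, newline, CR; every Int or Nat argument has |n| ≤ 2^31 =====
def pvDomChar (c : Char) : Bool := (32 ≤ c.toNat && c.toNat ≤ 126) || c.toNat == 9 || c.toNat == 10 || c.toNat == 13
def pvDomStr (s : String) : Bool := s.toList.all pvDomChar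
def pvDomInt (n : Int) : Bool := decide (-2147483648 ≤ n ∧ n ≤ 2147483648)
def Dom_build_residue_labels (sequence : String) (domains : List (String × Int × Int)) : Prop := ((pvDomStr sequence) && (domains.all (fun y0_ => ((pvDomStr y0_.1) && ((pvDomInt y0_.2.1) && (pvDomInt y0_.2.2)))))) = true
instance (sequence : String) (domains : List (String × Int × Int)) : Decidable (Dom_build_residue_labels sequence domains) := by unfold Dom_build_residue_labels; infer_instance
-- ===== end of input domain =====

-- B replaces A's mutable paint-array (first covering domain wins, skip painted cells) by an
-- independent per-position scan for the first known domain covering the position (objective: alternative).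

-- ===== PORT A =====
-- the module constant TARGET_PFAM
def targetPfam : PySem.Dict String String :=
  PySem.Dict.ofList [("PF00078", "RVT_1"), ("PF06817", "RVT_thumb"), ("PF06815", "RVT_connect"),
   ("PF00075", "RNase_H"), ("PF08388", "GIIM")]

-- body of A's inner loop: 'if labels[pos] == "none": labels[pos] = name'
def paintStep (name : String) (labels : List String) (pos : Int) : List String :=
  if PySem.List.pyGet? labels pos = some "none" then PySem.List.pySetD labels pos name else labels

-- body of A's outer loop (seqLen = len(sequence), recomputed constant)
def paintDomain (seqLen : Int) (labels : List String) (d : String × Int × Int) : List String :=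
  match PySem.Dict.get? targetPfam d.1 with
  | none => labels
  | some name =>
      (PySem.List.pyRange (max 0 (d.2.1 - 1)) (min d.2.2 seqLen) 1).foldl (paintStep name) labels

def build_residue_labels (sequence : String) (domains : List (String × Int × Int)) : List String :=
  domains.foldl (paintDomain (sequence.toList.length : Int))
    (List.replicate sequence.toList.length "none")

-- ===== PORT B =====
-- the filtered comprehension: [(TARGET_PFAM[p], s, e) for (p, s, e) in domains if p in TARGET_PFAM]
def altDoms (domains : List (String × Int × Int)) : List (String × Int × Int) :=
  domains.filterMap (fun d => (PySem.Dict.get? targetPfam d.1).map (fun n => (n, d.2.1, d.2.2)))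

-- lab(i): first known domain covering i, else "none"
def labOf (i : Int) : List (String × Int × Int) → String
  | [] => "none"
  | (n, s, e) :: rest => if s - 1 ≤ i ∧ i < e then n else labOf i rest

def build_residue_labels_alt (sequence : String) (domains : List (String × Int × Int)) : List String :=
  (PySem.List.pyRange 0 (sequence.toList.length : Int) 1).map
    (fun i => labOf i (altDoms domains))

-- ===== PRECONDITION & SPEC =====
def Spec_build_residue_labels (sequence : String) (domains : List (String × Int × Int)) (out : List String) : Prop := out = build_residue_labels_alt sequence domains
instance (sequence : String) (domains : List (String × Int × Int)) (out : List String) : Decidable (Spec_build_residue_labels sequence domains out) := by unfold Spec_build_residue_labels; infer_instance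

-- ===== CLAIM (what is proved, stated in full; the proofs are below) =====
def Claim_equal_build_residue_labels : Prop := ∀ (sequence : String) (domains : List (String × Int × Int)), Dom_build_residue_labels sequence domains → Spec_build_residue_labels sequence domains (build_residue_labels sequence domains)

-- ===== LEMMAS AND PROOFS =====

-- A's result at position i, characterised: the first domain with a known pfam covering i wins
def firstLabel (i : Int) : List (String × Int × Int) → String
  | [] => "none"
  | (p, s, e) :: rest =>
      match PySem.Dict.get? targetPfam p with
      | none => firstLabel i rest
      | some n => if s - 1 ≤ i ∧ i < e then n else firstLabel i rest

lemma targetPfam_ne_none (p n : String) (h : PySem.Dict.get? targetPfam p = some n) :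
    n ≠ "none" := by
  have he : targetPfam = PySem.Dict.mk
      [("PF00078", "RVT_1"), ("PF06817", "RVT_thumb"), ("PF06815", "RVT_connect"),
       ("PF00075", "RNase_H"), ("PF08388", "GIIM")] := by decide
  rw [he] at h
  simp only [PySem.Dict.get?_mk_cons] at h
  split_ifs at h <;> first | (injection h with h2; subst h2; decide) | simp [PySem.Dict.get?] at h

lemma paintStep_length (name : String) (labels : List String) (pos : Int) :
    (paintStep name labels pos).length = labels.length := by
  unfold paintStep
  split
  · exact PySem.List.length_pySetD ..
  · rfl

lemma paint_spec (name : String) (m : Nat) : ∀ (a b : Int) (labels : List String),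
    0 ≤ a → b ≤ (labels.length : Int) → m = (b - a).toNat →
    ((PySem.List.pyRange a b 1).foldl (paintStep name) labels).length = labels.length ∧
    ∀ k : Nat, ((PySem.List.pyRange a b 1).foldl (paintStep name) labels)[k]? =
      if a ≤ (k : Int) ∧ (k : Int) < b ∧ labels[k]? = some "none" then some name
      else labels[k]? := by
  induction m with
  | zero =>
      intro a b labels ha hb hm
      have hba : b ≤ a := by omega
      rw [PySem.List.pyRange_one_eq_nil hba]
      refine ⟨rfl, fun k => ?_⟩
      simp only [List.foldl_nil]
      split
      · omega
      · rfl
  | succ m ih =>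
      intro a b labels ha hb hm
      have hab : a < b := by omega
      rw [PySem.List.pyRange_one_cons hab, List.foldl_cons]
      have halen : a.toNat < labels.length := by omega
      have hget : PySem.List.pyGet? labels a = some labels[a.toNat] :=
        PySem.List.pyGet?_eq_some_getElem labels ha (by omega)
      have hlen1 : (paintStep name labels a).length = labels.length := paintStep_length _ _ _
      obtain ⟨ihlen, ihget⟩ := ih (a + 1) b (paintStep name labels a) (by omega)
        (by omega) (by omega)
      refine ⟨by rw [ihlen, hlen1], fun k => ?_⟩
      rw [ihget k]
      by_cases hA : labels[a.toNat] = "none"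
      · have hstep : paintStep name labels a = labels.set a.toNat name := by
          unfold paintStep
          rw [hget, hA, if_pos rfl, PySem.List.pySetD_of_nonneg labels name ha]
        rw [hstep]
        by_cases hk : k = a.toNat
        · subst hk
          have : (labels.set a.toNat name)[a.toNat]? = some name := by
            simp [halen]
          rw [this]
          have hcond : ¬ (a + 1 ≤ (a.toNat : Int) ∧ (a.toNat : Int) < b ∧ some name = some "none") := by
            omega
          rw [if_neg hcond, if_pos ⟨by omega, by omega, by simp [List.getElem?_eq_getElem halen, hA]⟩]
        · have hne : (labels.set a.toNat name)[k]? = labels[k]? := by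
            simp [Ne.symm hk]
          rw [hne]
          have : ((k : Int) = a) → False := fun h => hk (by omega)
          by_cases h1 : a ≤ (k : Int) ∧ (k : Int) < b ∧ labels[k]? = some "none"
          · rw [if_pos ⟨by omega, h1.2.1, h1.2.2⟩, if_pos h1]
          · rw [if_neg (by intro h; exact h1 ⟨by omega, h.2⟩), if_neg h1]
      · have hstep : paintStep name labels a = labels := by
          unfold paintStep
          rw [hget]
          rw [if_neg (by simp [hA])]
        rw [hstep]
        by_cases hk : k = a.toNat
        · subst hk
          have hgk : labels[a.toNat]? = some labels[a.toNat] := List.getElem?_eq_getElem halen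
          have hns : labels[a.toNat]? ≠ some "none" := by simp [hgk, hA]
          rw [if_neg (by intro h; exact hns h.2.2), if_neg (by intro h; exact hns h.2.2)]
        · have : ((k : Int) = a) → False := fun h => hk (by omega)
          by_cases h1 : a ≤ (k : Int) ∧ (k : Int) < b ∧ labels[k]? = some "none"
          · rw [if_pos ⟨by omega, h1.2.1, h1.2.2⟩, if_pos h1]
          · rw [if_neg (by intro h; exact h1 ⟨by omega, h.2⟩), if_neg h1]

lemma outer_spec (n : Nat) : ∀ (ds : List (String × Int × Int)) (labels : List String),
    labels.length = n →
    (ds.foldl (paintDomain (n : Int)) labels).length = n ∧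
    ∀ k : Nat, (ds.foldl (paintDomain (n : Int)) labels)[k]? =
      if labels[k]? = some "none" then some (firstLabel (k : Int) ds) else labels[k]? := by
  intro ds
  induction ds with
  | nil =>
      intro labels hlen
      refine ⟨hlen, fun k => ?_⟩
      simp only [List.foldl_nil, firstLabel]
      split
      · next h => exact h
      · rfl
  | cons d rest ih =>
      intro labels hlen
      obtain ⟨p, s, e⟩ := d
      rw [List.foldl_cons]
      cases hname : PySem.Dict.get? targetPfam p with
      | none =>
          have hpd : paintDomain (n : Int) labels (p, s, e) = labels := by
            unfold paintDomain; rw [hname]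
          rw [hpd]
          obtain ⟨ihlen, ihget⟩ := ih labels hlen
          refine ⟨ihlen, fun k => ?_⟩
          rw [ihget k]
          simp only [firstLabel, hname]
      | some name =>
          have hpd : paintDomain (n : Int) labels (p, s, e) =
              (PySem.List.pyRange (max 0 (s - 1)) (min e (n : Int)) 1).foldl (paintStep name) labels := by
            unfold paintDomain; rw [hname]
          rw [hpd]
          obtain ⟨plen, pget⟩ := paint_spec name ((min e (n : Int)) - max 0 (s - 1)).toNat
            (max 0 (s - 1)) (min e (n : Int)) labels (by omega) (by omega) rfl
          obtain ⟨ihlen, ihget⟩ := ih _ (by rw [plen, hlen])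
          refine ⟨ihlen, fun k => ?_⟩
          have hpk := pget k
          rw [ihget k, hpk]
          by_cases hC1 : max 0 (s - 1) ≤ (k : Int) ∧ (k : Int) < min e (n : Int) ∧ labels[k]? = some "none"
          · rw [if_pos hC1]
            have hnn : name ≠ "none" := targetPfam_ne_none p name hname
            rw [if_neg (by simp [hnn]), if_pos hC1.2.2]
            simp only [firstLabel, hname]
            rw [if_pos ⟨by omega, by omega⟩]
          · rw [if_neg hC1]
            by_cases hnone : labels[k]? = some "none"
            · rw [if_pos hnone, if_pos hnone]
              obtain ⟨hkl, -⟩ := List.getElem?_eq_some_iff.mp hnone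
              have hcov : ¬ (s - 1 ≤ (k : Int) ∧ (k : Int) < e) := by
                intro hc
                exact hC1 ⟨by omega, by omega, hnone⟩
              simp only [firstLabel, hname]
              rw [if_neg hcov]
            · rw [if_neg hnone, if_neg hnone]

lemma labOf_altDoms (i : Int) (ds : List (String × Int × Int)) :
    labOf i (altDoms ds) = firstLabel i ds := by
  induction ds with
  | nil => rfl
  | cons d rest ih =>
      obtain ⟨p, s, e⟩ := d
      cases hname : PySem.Dict.get? targetPfam p with
      | none =>
          simp only [altDoms, List.filterMap_cons, hname, Option.map_none, firstLabel]
          exact ih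
      | some name =>
          simp only [altDoms, List.filterMap_cons, hname, Option.map_some, firstLabel, labOf]
          split
          · rfl
          · exact ih

lemma main_eq (sequence : String) (domains : List (String × Int × Int)) :
    build_residue_labels sequence domains = build_residue_labels_alt sequence domains := by
  set n := sequence.toList.length with hn
  obtain ⟨hlen, hget⟩ := outer_spec n domains (List.replicate n "none") (by simp)
  apply List.ext_getElem?
  intro k
  unfold build_residue_labels build_residue_labels_alt
  rw [← hn, hget k]
  by_cases hk : k < n
  · rw [PySem.List.getElem?_map_pyRange_zero _ n k hk]
    simp [hk, labOf_altDoms]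
  · have h1 : (List.replicate n "none")[k]? = none := by
      apply List.getElem?_eq_none; simp; omega
    rw [h1, if_neg (by simp)]
    have h2 : ((PySem.List.pyRange 0 (n : Int) 1).map (fun i => labOf i (altDoms domains))).length = n := by
      simp [PySem.List.length_pyRange_one]
    symm
    apply List.getElem?_eq_none
    omega

-- ===== VERDICT (by name: the statement is the Claim_ definition above) =====
theorem build_residue_labels_spec : Claim_equal_build_residue_labels := by
  intro sequence domains _
  unfold Spec_build_residue_labels
  exact main_eq sequence domains
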